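-- pv_equiv track=rewrite | github.com/plhosk/wordtracer | scripts/generate_boards.py | intersection_count
-- ===== SOURCE A (Python) =====
-- def intersection_count(candidate: dict) -> int:
--     visits: dict[tuple[int, int], int] = {}
--     for answer in candidate.get("answers", []):
--         if not isinstance(answer, dict):
--             continue
--         for row, col in answer.get("path", []):
--             key = (int(row), int(col))
--             visits[key] = visits.get(key, 0) + 1
--     return sum(1 for count in visits.values() if count >= 2)
-- ===== SOURCE B (Python) =====
-- def intersection_count(candidate: dict) -> int:
--     keys = [(int(row), int(col))
--             for answer in candidate.get("answers", [])
--             if isinstance(answer, dict)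
--             for row, col in answer.get("path", [])]
--     keys.sort()
--     total = 0
--     prev = None
--     runlen = 0
--     for key in keys:
--         if key == prev:
--             runlen += 1
--         else:
--             if runlen >= 2:
--                 total += 1
--             prev = key
--             runlen = 1
--     if runlen >= 2:
--         total += 1
--     return total
-- ===== Notes on version B (the rewrite author's own statement) =====
-- stated objective: alternative
-- what changed: Replaces the hash-tally (per-cell count dict plus a final values pass) with sort-then-scan: flatten all visited cells into one list, sort it, and count maximal runs of equal adjacent cells of length >= 2 in a single linear scan with no dict or set at all.
import Mathlib
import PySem

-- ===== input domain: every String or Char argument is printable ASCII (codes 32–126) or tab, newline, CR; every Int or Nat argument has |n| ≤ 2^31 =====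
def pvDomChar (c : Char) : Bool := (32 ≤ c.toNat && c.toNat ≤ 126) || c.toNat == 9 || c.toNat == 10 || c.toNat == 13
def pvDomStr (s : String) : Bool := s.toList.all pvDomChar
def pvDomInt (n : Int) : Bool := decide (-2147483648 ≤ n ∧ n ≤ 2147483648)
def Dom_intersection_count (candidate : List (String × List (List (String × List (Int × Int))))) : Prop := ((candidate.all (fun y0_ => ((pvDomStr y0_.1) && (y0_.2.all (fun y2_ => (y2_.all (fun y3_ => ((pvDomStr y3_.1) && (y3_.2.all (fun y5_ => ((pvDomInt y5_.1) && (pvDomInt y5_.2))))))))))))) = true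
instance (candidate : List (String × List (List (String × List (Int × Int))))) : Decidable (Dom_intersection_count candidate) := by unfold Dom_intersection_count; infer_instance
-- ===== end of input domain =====

-- B replaces A's per-cell tally dict (plus its final pass over the values) by sort-then-scan:
-- flatten the visited cells, sort them, and count maximal runs of ≥ 2 equal adjacent cells in one
-- linear scan; objective: alternative (no dict at all, at the price of a sort). Under the type
-- convention every answer IS a dict, so A's `isinstance(answer, dict)` guard is always true.

-- ===== PORT A =====
def intersection_count (candidate : List (String × List (List (String × List (Int × Int))))) : Int :=
  let answers := (PySem.Dict.mk candidate).getD "answers" []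
  let visits : PySem.Dict (Int × Int) Int :=
    answers.foldl (fun v answer =>
      ((PySem.Dict.mk answer).getD "path" []).foldl
        (fun v p => v.insert (p.1, p.2) (v.getD (p.1, p.2) 0 + 1)) v)
      PySem.Dict.empty
  -- sum(1 for count in visits.values() if count >= 2)
  visits.values.foldl (fun acc c => if c ≥ 2 then acc + 1 else acc) 0

-- ===== PORT B =====
def intersection_count_alt (candidate : List (String × List (List (String × List (Int × Int))))) : Int :=
  let keys : List (Int × Int) :=
    ((PySem.Dict.mk candidate).getD "answers" []).flatMap
      (fun answer => ((PySem.Dict.mk answer).getD "path" []).map (fun p => (p.1, p.2)))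
  let s := PySem.List.sorted2 keys (·.1) (·.2)
  let st := s.foldl
      (fun (st : Int × Option (Int × Int) × Int) key =>
        if some key = st.2.1 then (st.1, st.2.1, st.2.2 + 1)
        else ((if st.2.2 ≥ 2 then st.1 + 1 else st.1), some key, 1))
      (0, none, 0)
  if st.2.2 ≥ 2 then st.1 + 1 else st.1

-- ===== PRECONDITION & SPEC =====
def Spec_intersection_count (candidate : List (String × List (List (String × List (Int × Int))))) (out : Int) : Prop := out = intersection_count_alt candidate
instance (candidate : List (String × List (List (String × List (Int × Int))))) (out : Int) : Decidable (Spec_intersection_count candidate out) := by unfold Spec_intersection_count; infer_instance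

-- ===== CLAIM (what is proved, stated in full; the proofs are below) =====
def Claim_equal_intersection_count : Prop := ∀ (candidate : List (String × List (List (String × List (Int × Int))))), Dom_intersection_count candidate → Spec_intersection_count candidate (intersection_count candidate)

-- ===== LEMMAS AND PROOFS =====

-- the flattened list of visited keys of one candidate's answers
def pvKeys (answers : List (List (String × List (Int × Int)))) : List (Int × Int) :=
  answers.flatMap (fun answer => (PySem.Dict.mk answer).getD "path" [])

-- the nested answer/path loop is a fold over the flattened key list
theorem pv_foldl_flat {σ : Type} (f : σ → Int × Int → σ)
    (answers : List (List (String × List (Int × Int)))) (s : σ) :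
    answers.foldl (fun s answer =>
      ((PySem.Dict.mk answer).getD "path" []).foldl f s) s
      = (pvKeys answers).foldl f s := by
  induction answers generalizing s with
  | nil => rfl
  | cons a t ih => simp only [pvKeys, List.flatMap_cons, List.foldl_append, List.foldl_cons] at *
                   exact ih _

-- the conditional-count fold is a countP
theorem pv_foldl_count (l : List Int) (a : Int) :
    l.foldl (fun acc c => if c ≥ 2 then acc + 1 else acc) a
      = a + (l.countP (fun c => decide (2 ≤ c)) : Int) := by
  induction l generalizing a with
  | nil => simp
  | cons x t ih =>
    simp only [List.foldl_cons, List.countP_cons, ih]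
    by_cases h : (2 : Int) ≤ x
    · simp [h]; ring
    · simp [h, ge_iff_le]

-- the number of cells visited at least twice, read off any rearrangement l of the key list
def pvW (l : List (Int × Int)) : Int :=
  ((PySem.List.dedup l).countP (fun k => decide (2 ≤ l.count k)) : Int)

-- pvW only depends on the multiset of keys
theorem pvW_perm (l l' : List (Int × Int)) (h : l.Perm l') : pvW l = pvW l' := by
  unfold pvW
  have hcnt : ∀ k : Int × Int, l.count k = l'.count k := fun k => h.count_eq k
  have hperm : (PySem.List.dedup l).Perm (PySem.List.dedup l') := by
    simp only [PySem.List.dedup_eq_ofList]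
    rw [List.perm_ext_iff_of_nodup (PySem.Set.nodup_ofList l) (PySem.Set.nodup_ofList l')]
    intro k
    rw [PySem.Set.mem_ofList, PySem.Set.mem_ofList]
    exact ⟨fun hk => h.mem_iff.mp hk, fun hk => h.mem_iff.mpr hk⟩
  rw [hperm.countP_eq]
  congr 1
  apply List.countP_congr
  intro k _
  simp [hcnt k]

-- peeling the first element off pvW
theorem pvW_cons (y : Int × Int) (s : List (Int × Int)) :
    pvW (y :: s) = (if 2 ≤ (y :: s).count y then 1 else 0) + pvW (s.filter (fun k => k ≠ y)) := by
  unfold pvW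
  simp only [PySem.List.dedup_eq_ofList, PySem.Set.ofList_cons]
  rw [List.countP_cons]
  have hperm : (PySem.Set.discard (PySem.Set.ofList s) y).Perm
      (PySem.Set.ofList (s.filter (fun k => k ≠ y))) := by
    rw [List.perm_ext_iff_of_nodup (PySem.Set.nodup_discard _ _ (PySem.Set.nodup_ofList s))
      (PySem.Set.nodup_ofList _)]
    intro k
    rw [PySem.Set.mem_discard, PySem.Set.mem_ofList, PySem.Set.mem_ofList, List.mem_filter]
    simp
  rw [hperm.countP_eq]
  have hcnt : (PySem.Set.ofList (s.filter (fun k => k ≠ y))).countP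
        (fun k => decide (2 ≤ (y :: s).count k))
      = (PySem.Set.ofList (s.filter (fun k => k ≠ y))).countP
        (fun k => decide (2 ≤ (s.filter (fun k => k ≠ y)).count k)) := by
    apply List.countP_congr
    intro k hk
    have hky : k ≠ y := by
      have hmem := (PySem.Set.mem_ofList _ _).mp hk
      have := (List.mem_filter.mp hmem).2
      simpa using this
    have h1 : (y :: s).count k = s.count k := List.count_cons_of_ne (Ne.symm hky) -- y ≠ k
    have h2 : (s.filter (fun k => k ≠ y)).count k = s.count k :=
      List.count_filter (by simpa using hky)
    simp only [decide_eq_true_eq]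
    rw [h1, h2]
  rw [hcnt]
  push_cast
  split_ifs with h1 h2 h3 <;> simp_all <;> ring

-- B's step function (definitionally the lambda in the port, by Prod eta)
def pvStep (st : Int × Option (Int × Int) × Int) (key : Int × Int) :
    Int × Option (Int × Int) × Int :=
  if some key = st.2.1 then (st.1, st.2.1, st.2.2 + 1)
  else ((if st.2.2 ≥ 2 then st.1 + 1 else st.1), some key, 1)

-- B's scan with the trailing flush
def pvRun (s : List (Int × Int)) (st : Int × Option (Int × Int) × Int) : Int :=
  let st' := s.foldl pvStep st
  if st'.2.2 ≥ 2 then st'.1 + 1 else st'.1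

-- sorted2 on pairs is sorted by the lexicographic key
theorem pv_sorted2_eq (xs : List (Int × Int)) :
    PySem.List.sorted2 xs (·.1) (·.2) = PySem.List.sorted xs (fun p => toLex p) := by
  show xs.foldl (fun acc x => PySem.List.insertBy
      (fun a b => decide (a.1 < b.1) || (!decide (b.1 < a.1) && decide (a.2 < b.2))) x acc) []
    = xs.foldl (fun acc x => PySem.List.insertBy
      (fun a b => decide (toLex a < toLex b)) x acc) []
  have hbf : (fun (a b : Int × Int) =>
        decide (a.1 < b.1) || (!decide (b.1 < a.1) && decide (a.2 < b.2)))
      = (fun (a b : Int × Int) => decide (toLex a < toLex b)) := by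
    funext a b
    rcases lt_trichotomy a.1 b.1 with h | h | h
    · simp [Prod.Lex.lt_iff, h, not_lt.mpr (le_of_lt h)]
    · simp [Prod.Lex.lt_iff, h]
    · simp [Prod.Lex.lt_iff, not_lt.mpr (le_of_lt h), h, ne_of_gt h]
  rw [hbf]

-- run-scan invariant: inside a run of x with r occurrences already counted into the run length
theorem pv_scan (s : List (Int × Int))
    (hs : s.Pairwise (fun a b => toLex a ≤ toLex b))
    (x : Int × Int) (hx : ∀ y ∈ s, toLex x ≤ toLex y) (t r : Int) :
    pvRun s (t, some x, r)
      = (if 2 ≤ r + (s.count x : Int) then t + 1 else t) + pvW (s.filter (fun k => k ≠ x)) := by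
  induction s generalizing x t r with
  | nil =>
    simp [pvRun, pvW, PySem.List.dedup_eq_ofList, PySem.Set.ofList_nil, ge_iff_le]
  | cons y s' ih =>
    have hs' := (List.pairwise_cons.mp hs).2
    have hy := (List.pairwise_cons.mp hs).1
    by_cases hyx : y = x
    · subst hyx
      have hstep : pvStep (t, some y, r) y = (t, some y, r + 1) := by simp [pvStep]
      rw [pvRun, List.foldl_cons, hstep]
      have hih := ih hs' y (fun z hz => hy z hz) t (r + 1)
      rw [pvRun] at hih
      rw [hih]
      have hcnt : ((y :: s').count y : Int) = (s'.count y : Int) + 1 := by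
        push_cast [List.count_cons_self]
        ring
      have hfil : (y :: s').filter (fun k => k ≠ y) = s'.filter (fun k => k ≠ y) := by simp
      rw [hfil, hcnt]
      have harith : r + 1 + (s'.count y : Int) = r + ((s'.count y : Int) + 1) := by ring
      rw [harith]
    · -- y ≠ x : x never occurs again (sortedness), flush the x-run and start a y-run
      have hxny : x ∉ y :: s' := by
        intro hmem
        rcases List.mem_cons.mp hmem with h | h
        · exact hyx h.symm
        · exact hyx (toLex.injective (le_antisymm (hy x h) (hx y List.mem_cons_self)))
      have hstep : pvStep (t, some x, r) y = ((if r ≥ 2 then t + 1 else t), some y, 1) := by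
        simp [pvStep, hyx]
      rw [pvRun, List.foldl_cons, hstep]
      have hih := ih hs' y (fun z hz => hy z hz) (if r ≥ 2 then t + 1 else t) 1
      rw [pvRun] at hih
      rw [hih]
      have hcx : (y :: s').count x = 0 :=
        List.count_eq_zero.mpr hxny
      have hfil : (y :: s').filter (fun k => k ≠ x) = y :: s' := by
        apply List.filter_eq_self.mpr
        intro a ha
        simp only [decide_eq_true_eq]
        intro h
        subst h
        exact hxny ha
      rw [hfil, hcx, pvW_cons]
      have hcy : 2 ≤ (y :: s').count y ↔ 2 ≤ (1 : Int) + (s'.count y : Int) := by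
        rw [List.count_cons_self]
        omega
      simp only [Nat.cast_zero, add_zero, ge_iff_le]
      by_cases h1 : 2 ≤ r <;> by_cases h2 : 2 ≤ (1:Int) + (s'.count y : Int) <;>
        simp only [h1, h2, hcy, if_true, if_false] <;> ring

theorem intersection_count_spec : Claim_equal_intersection_count := by
  intro candidate _
  unfold Spec_intersection_count intersection_count intersection_count_alt
  set answers := (PySem.Dict.mk candidate).getD "answers" [] with hans
  set ks := pvKeys answers with hks
  -- A's dict is the counter of ks
  have hA : (answers.foldl (fun v answer =>
      ((PySem.Dict.mk answer).getD "path" []).foldl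
        (fun (v : PySem.Dict (Int × Int) Int) p =>
          v.insert (p.1, p.2) (v.getD (p.1, p.2) 0 + 1)) v) PySem.Dict.empty)
      = PySem.Dict.counter ks := by
    rw [pv_foldl_flat]
    exact PySem.Dict.foldl_insert_getD_add_one_eq_counter ks
  simp only [hA]
  -- evaluate A's side: countP of the distinct keys with multiplicity ≥ 2
  have hval : (PySem.Dict.counter ks).values
      = (PySem.Set.ofList ks).map (fun k => (ks.count k : Int)) := by
    show (PySem.Dict.counter ks).items.map (·.2) = _
    rw [PySem.Dict.items_counter]
    simp
  rw [pv_foldl_count, hval, List.countP_map]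
  simp only [Function.comp_def]
  -- B's flattened key list is ks (Prod eta on the comprehension's tuples)
  have hkeys : (answers.flatMap
      (fun answer => ((PySem.Dict.mk answer).getD "path" []).map (fun p => (p.1, p.2)))) = ks := by
    rw [hks, pvKeys]
    congr 1
    funext answer
    exact List.map_id' _
  rw [hkeys]
  -- B's scan over the sorted keys computes pvW of the sorted list
  set s := PySem.List.sorted2 ks (·.1) (·.2) with hsdef
  have hsort : s = PySem.List.sorted ks (fun p => toLex p) := pv_sorted2_eq ks
  have hperm : s.Perm ks := hsort ▸ PySem.List.sorted_perm ks _ _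
  have hpair : s.Pairwise (fun a b => toLex a ≤ toLex b) := by
    rw [hsort]; exact PySem.List.sorted_pairwise ks _
  have hB : (s.foldl
      (fun (st : Int × Option (Int × Int) × Int) key =>
        if some key = st.2.1 then (st.1, st.2.1, st.2.2 + 1)
        else ((if st.2.2 ≥ 2 then st.1 + 1 else st.1), some key, 1))
      (0, none, 0)) = s.foldl pvStep (0, none, 0) := rfl
  have hscan : pvRun s (0, none, 0) = pvW s := by
    cases hsnil : s with
    | nil => simp [pvRun, pvW, PySem.List.dedup_eq_ofList, PySem.Set.ofList_nil]
    | cons y s' =>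
      have hpair' := hsnil ▸ hpair
      have hs' := (List.pairwise_cons.mp hpair').2
      have hy := (List.pairwise_cons.mp hpair').1
      have hstep : pvStep (0, none, 0) y = (0, some y, 1) := by simp [pvStep]
      rw [pvRun, List.foldl_cons, hstep]
      have := pv_scan s' hs' y (fun z hz => hy z hz) 0 1
      rw [pvRun] at this
      rw [this, pvW_cons]
      congr 1
      rw [List.count_cons_self]
      split_ifs with h1 h2 <;> push_cast at * <;> omega
  -- assemble
  rw [hB]
  have hgoal : (if (s.foldl pvStep (0, none, 0)).2.2 ≥ 2 then (s.foldl pvStep (0, none, 0)).1 + 1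
      else (s.foldl pvStep (0, none, 0)).1) = pvW s := hscan
  rw [hgoal, pvW_perm s ks hperm]
  unfold pvW
  simp only [PySem.List.dedup_eq_ofList]
  have hpred : (PySem.Set.ofList ks).countP (fun k => decide (2 ≤ (ks.count k : Int)))
      = (PySem.Set.ofList ks).countP (fun k => decide (2 ≤ ks.count k)) := by
    apply List.countP_congr
    intro k _
    simp only [decide_eq_true_eq]
    omega
  rw [hpred]
  ring
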